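-- pv_equiv track=rewrite | github.com/thu-nics/CLAP-triangle-counting | reorder_preprocess/force_order/force_order.py | community_preprocessing
-- ===== SOURCE A (Python) =====
-- from typing import Any, Optional, Tuple, List, Set, Dict, Union
--
-- def community_preprocessing(comm_dict: Dict = None):
--     """
--     comm_dict: key: node index value: the community index this node belongs to
--     return
--     comm_mapping: mapping used to convert unconsecutive community index into consecutive number
--     comm_list: each element of this list is a community containing all node in this community
--     """
--     comm_set = set()
--     comm_mapping = dict()
--     comm_list = list()
--
--     for node in comm_dict:
--         if comm_dict[node] not in comm_set:
--             comm_mapping[comm_dict[node]] = len(comm_set)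
--             comm_set.add(comm_dict[node])
--             comm_list.append([])
--         comm_list[comm_mapping[comm_dict[node]]].append(node)
--
--     return comm_mapping, comm_list
-- ===== SOURCE B (Python) =====
-- def community_preprocessing(comm_dict=None):
--     # staged passes: extract community values, dedup for first-seen order,
--     # then build each community by filtering the whole dict per community
--     vals = [comm_dict[node] for node in comm_dict]
--     order = []
--     for v in vals:
--         if v not in order:
--             order.append(v)
--     comm_mapping = {c: i for i, c in enumerate(order)}
--     comm_list = [[node for node in comm_dict if comm_dict[node] == c] for c in order]
--     return comm_mapping, comm_list
-- ===== Notes on version B (the rewrite author's own statement) =====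
-- stated objective: alternative
-- what changed: Replaces A's single pass with three coupled accumulators (seen-set, index mapping, indexed list mutated in place) by staged passes: a value list, a first-seen dedup giving the community order, and one filtering scan of the whole dict per community to build each group.
import Mathlib
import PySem

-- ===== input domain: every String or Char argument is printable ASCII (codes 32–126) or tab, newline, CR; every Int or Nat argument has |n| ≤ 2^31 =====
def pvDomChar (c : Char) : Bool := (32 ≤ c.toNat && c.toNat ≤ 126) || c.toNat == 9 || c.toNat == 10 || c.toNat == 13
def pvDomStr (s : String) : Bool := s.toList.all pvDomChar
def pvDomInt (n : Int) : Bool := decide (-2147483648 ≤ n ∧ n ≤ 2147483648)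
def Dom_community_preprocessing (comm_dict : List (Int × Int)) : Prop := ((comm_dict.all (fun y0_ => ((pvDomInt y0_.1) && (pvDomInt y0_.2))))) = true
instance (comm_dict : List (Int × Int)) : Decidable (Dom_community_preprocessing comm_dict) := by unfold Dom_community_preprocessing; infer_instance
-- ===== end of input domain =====

-- B replaces A's single pass with three coupled accumulators by staged passes: value list, first-seen dedup for the order, then one filtering scan per community (objective: alternative).

-- ===== PORT A =====
-- step of A's loop: state = (comm_set, comm_mapping, comm_list); p = (node, comm_dict[node])
def cpStepA (st : PySem.Set Int × PySem.Dict Int Int × List (List Int)) (p : Int × Int) :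
    PySem.Set Int × PySem.Dict Int Int × List (List Int) :=
  let st1 := if PySem.Set.contains st.1 p.2 then st
             else (PySem.Set.add st.1 p.2, st.2.1.insert p.2 (PySem.Set.len st.1), st.2.2 ++ [[]])
  let i := st1.2.1.getD p.2 0
  (st1.1, st1.2.1, PySem.List.pySetD st1.2.2 i (PySem.List.pyGetD st1.2.2 i [] ++ [p.1]))

def community_preprocessing (comm_dict : List (Int × Int)) : (List (Int × Int)) × List (List Int) :=
  let st := comm_dict.foldl cpStepA (PySem.Set.empty, PySem.Dict.empty, [])
  (st.2.1.items, st.2.2)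

-- ===== PORT B =====
def community_preprocessing_alt (comm_dict : List (Int × Int)) : (List (Int × Int)) × List (List Int) :=
  let vals := comm_dict.map (fun p => p.2)
  let order := vals.foldl (fun acc v => if acc.contains v then acc else acc ++ [v]) []
  ((PySem.List.enumerate order).map (fun q => (q.2, q.1)),
   order.map (fun c => (comm_dict.filter (fun p => p.2 == c)).map (fun p => p.1)))

-- ===== PRECONDITION & SPEC =====
def Spec_community_preprocessing (comm_dict : List (Int × Int)) (out : (List (Int × Int)) × List (List Int)) : Prop := out = community_preprocessing_alt comm_dict
instance (comm_dict : List (Int × Int)) (out : (List (Int × Int)) × List (List Int)) : Decidable (Spec_community_preprocessing comm_dict out) := by unfold Spec_community_preprocessing; infer_instance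

-- ===== CLAIM (what is proved, stated in full; the proofs are below) =====
def Claim_equal_community_preprocessing : Prop := ∀ (comm_dict : List (Int × Int)), Dom_community_preprocessing comm_dict → Spec_community_preprocessing comm_dict (community_preprocessing comm_dict)

-- ===== LEMMAS AND PROOFS =====

-- proof-side grouping dict fold (the bridge between the two algorithms)
def foldG (d : PySem.Dict Int (List Int)) (p : Int × Int) : PySem.Dict Int (List Int) :=
  d.modify p.2 [] (fun l => l ++ [p.1])

-- A's comm_mapping, reconstructed from the grouping dict's key list (start index i0)
def cpEnum (i0 : Int) (ks : List Int) : PySem.Dict Int Int :=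
  PySem.Dict.mk ((PySem.List.enumerate ks i0).map (fun q => (q.2, q.1)))

-- index of first occurrence
def cpIdx (c : Int) : List Int → Nat
  | [] => 0
  | k :: ks => if k = c then 0 else cpIdx c ks + 1

theorem cpEnum_cons (k : Int) (ks : List Int) (i0 : Int) :
    cpEnum i0 (k :: ks) = PySem.Dict.mk ((k, i0) :: (cpEnum (i0+1) ks).items) := rfl

theorem keys_cpEnum (ks : List Int) (i0 : Int) : (cpEnum i0 ks).keys = ks := by
  induction ks generalizing i0 with
  | nil => rfl
  | cons k ks ih =>
      simp only [cpEnum_cons, PySem.Dict.keys] at *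
      simpa using ih (i0 + 1)

theorem cpIdx_lt_length {c : Int} {ks : List Int} (h : c ∈ ks) : cpIdx c ks < ks.length := by
  induction ks with
  | nil => cases h
  | cons k ks ih =>
      rcases List.mem_cons.mp h with h | h
      · simp [cpIdx, h.symm]
      · by_cases hk : k = c <;> simp [cpIdx, hk, ih h]

theorem enumerate_append_last (ks : List Int) (c : Int) (i0 : Int) :
    PySem.List.enumerate (ks ++ [c]) i0 = PySem.List.enumerate ks i0 ++ [(i0 + ks.length, c)] := by
  induction ks generalizing i0 with
  | nil => simp [PySem.List.enumerate]
  | cons k ks ih =>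
      have hcons : ∀ (l : List Int) (j : Int),
          PySem.List.enumerate (k :: l) j = (j, k) :: PySem.List.enumerate l (j+1) :=
        fun _ _ => rfl
      rw [show ((k :: ks) ++ [c]) = k :: (ks ++ [c]) from rfl, hcons, hcons, ih (i0+1)]
      simp
      omega

theorem cpIdx_append_last {c : Int} {ks : List Int} (h : c ∉ ks) :
    cpIdx c (ks ++ [c]) = ks.length := by
  induction ks with
  | nil => simp [cpIdx]
  | cons k ks ih =>
      have hk : ¬ k = c := fun hkc => h (hkc ▸ List.mem_cons_self)
      simp [cpIdx, hk, ih (fun hc => h (List.mem_cons_of_mem k hc))]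

theorem get?_cpEnum {c : Int} {ks : List Int} (h : c ∈ ks) (i0 : Int) :
    (cpEnum i0 ks).get? c = some (i0 + (cpIdx c ks : Int)) := by
  induction ks generalizing i0 with
  | nil => cases h
  | cons k ks ih =>
      rw [cpEnum_cons, PySem.Dict.get?_mk_cons]
      by_cases hk : k = c
      · simp [hk, cpIdx]
      · have hc : c ∈ ks := by
          rcases List.mem_cons.mp h with h | h
          · exact absurd h.symm hk
          · exact h
        have hmk : ({ items := (cpEnum (i0+1) ks).items } : PySem.Dict Int Int) = cpEnum (i0+1) ks := rfl
        rw [if_neg (by simpa using hk), hmk, ih hc (i0+1)]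
        have : cpIdx c (k :: ks) = cpIdx c ks + 1 := by simp [cpIdx, hk]
        rw [this]
        congr 1
        push_cast
        ring

theorem find?_eq_getElem? {α : Type} (its : List (Int × α)) (c : Int)
    (h : c ∈ its.map Prod.fst) :
    List.find? (fun p => p.1 == c) its = its[cpIdx c (its.map Prod.fst)]? := by
  induction its with
  | nil => cases h
  | cons q its ih =>
      by_cases hq : q.1 = c
      · simp [List.find?, hq, cpIdx]
      · have hc : c ∈ its.map Prod.fst := by
          rcases List.mem_cons.mp h with h | h
          · exact absurd h.symm hq
          · exact h
        have hidx : cpIdx c ((q :: its).map Prod.fst) = cpIdx c (its.map Prod.fst) + 1 := by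
          simp [cpIdx, hq]
        rw [hidx, List.find?_cons_of_neg (by simpa using hq), ih hc]
        simp

theorem overwrite_eq_set {α : Type} (its : List (Int × α)) (c : Int) (v : α)
    (hnd : (its.map Prod.fst).Nodup) (h : c ∈ its.map Prod.fst) :
    its.map (fun p => if p.1 == c then (c, v) else p)
      = its.set (cpIdx c (its.map Prod.fst)) (c, v) := by
  induction its with
  | nil => cases h
  | cons q its ih =>
      simp only [List.map_cons, List.nodup_cons] at hnd
      by_cases hq : q.1 = c
      · have hrest : ∀ p ∈ its, (p.1 == c) = false := by
          intro p hp
          apply beq_eq_false_iff_ne.mpr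
          intro hpc
          exact hnd.1 (hq ▸ hpc ▸ List.mem_map_of_mem hp)
        have hmapid : its.map (fun p => if p.1 == c then (c, v) else p) = its := by
          rw [show its = its.map id from (List.map_id its).symm]
          rw [List.map_map]
          apply List.map_congr_left
          intro p hp
          have hne := hrest p hp
          simp only [Function.comp, id]
          simp at hne
          simp [hne]
        simp only [List.map_cons, cpIdx, hq, beq_self_eq_true, if_true, List.set, hmapid]
      · have hc : c ∈ its.map Prod.fst := by
          rcases List.mem_cons.mp h with h | h
          · exact absurd h.symm hq
          · exact h
        have hidx : cpIdx c ((q :: its).map Prod.fst) = cpIdx c (its.map Prod.fst) + 1 := by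
          simp [cpIdx, hq]
        rw [hidx]
        simp only [List.map_cons, List.set]
        rw [if_neg (by simpa using hq), ih hnd.2 hc]

theorem length_values (g : PySem.Dict Int (List Int)) : g.values.length = g.keys.length := by
  simp [PySem.Dict.values, PySem.Dict.keys]

theorem set_append_last {α : Type} (xs : List α) (a b : α) :
    (xs ++ [a]).set xs.length b = xs ++ [b] := by
  induction xs with
  | nil => rfl
  | cons x xs ih => simp [ih]

theorem getD_append_last {α : Type} (xs : List α) (a d : α) :
    (xs ++ [a]).getD xs.length d = a := by
  simp [List.getD_eq_getElem?_getD]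

theorem cp_step (g : PySem.Dict Int (List Int)) (hnd : g.keys.Nodup) (p : Int × Int) :
    cpStepA (g.keys, cpEnum 0 g.keys, g.values) p
      = ((foldG g p).keys, cpEnum 0 (foldG g p).keys, (foldG g p).values) := by
  obtain ⟨node, c⟩ := p
  by_cases hmem : c ∈ g.keys
  · -- community already seen
    have hDc : g.contains c = true := (PySem.Dict.contains_iff_mem_keys g c).mpr hmem
    have hSc : PySem.Set.contains g.keys c = true := by
      simp [PySem.Set.contains, List.contains_eq_mem, hmem]
    have hj : cpIdx c g.keys < g.keys.length := cpIdx_lt_length hmem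
    have hkeys' : (g.modify c [] (fun l => l ++ [node])).keys = g.keys := by
      unfold PySem.Dict.modify
      exact PySem.Dict.keys_insert_of_contains g _ hDc
    have hgetD : (cpEnum 0 g.keys).getD c 0 = ((cpIdx c g.keys : Nat) : Int) := by
      simp [PySem.Dict.getD, get?_cpEnum hmem 0]
    have hgfind : g.get? c = g.items[cpIdx c g.keys]?.map Prod.snd := by
      unfold PySem.Dict.get?
      rw [find?_eq_getElem? g.items c (by exact hmem)]
      rfl
    have hvalsj : g.values.getD (cpIdx c g.keys) [] = g.getD c [] := by
      rw [PySem.Dict.getD, hgfind, List.getD_eq_getElem?_getD]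
      simp [PySem.Dict.values, List.getElem?_map]
    have hvals' : (g.modify c [] (fun l => l ++ [node])).values
        = g.values.set (cpIdx c g.keys) (g.getD c [] ++ [node]) := by
      unfold PySem.Dict.modify
      rw [PySem.Dict.values, PySem.Dict.items_insert_of_contains g _ hDc,
        overwrite_eq_set g.items c _ hnd (by exact hmem)]
      rw [List.map_set]
      rfl
    show (_, _, _) = _
    unfold foldG
    simp only [hSc, if_true, hgetD, PySem.List.pySetD_natCast, PySem.List.pyGetD_natCast,
      hkeys', hvals', hvalsj]
  · -- new community
    have hDc : g.contains c = false := by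
      rw [← Bool.not_eq_true, PySem.Dict.contains_iff_mem_keys]; exact hmem
    have hSc : PySem.Set.contains g.keys c = false := by
      simp [PySem.Set.contains, List.contains_eq_mem]
      exact hmem
    have hadd : PySem.Set.add g.keys c = g.keys ++ [c] := by
      simp [PySem.Set.add, hmem]
    have hkeys' : (g.modify c [] (fun l => l ++ [node])).keys = g.keys ++ [c] := by
      unfold PySem.Dict.modify
      exact PySem.Dict.keys_insert_of_not_contains g _ hDc
    have hEc : (cpEnum 0 g.keys).contains c = false := by
      rw [← Bool.not_eq_true, PySem.Dict.contains_iff_mem_keys, keys_cpEnum]; exact hmem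
    have henum : (cpEnum 0 g.keys).insert c (PySem.Set.len g.keys) = cpEnum 0 (g.keys ++ [c]) := by
      apply PySem.Dict.ext
      rw [PySem.Dict.items_insert_of_not_contains _ _ hEc]
      show _ = (PySem.List.enumerate (g.keys ++ [c]) 0).map (fun q => (q.2, q.1))
      rw [enumerate_append_last]
      simp [cpEnum, PySem.Set.len]
    have hgetD : (cpEnum 0 (g.keys ++ [c])).getD c 0 = ((g.keys.length : Nat) : Int) := by
      rw [PySem.Dict.getD, get?_cpEnum (List.mem_append_right g.keys (List.mem_singleton.mpr rfl)) 0,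
        cpIdx_append_last hmem]
      simp
    have hvlen : g.values.length = g.keys.length := length_values g
    have hvals' : (g.modify c [] (fun l => l ++ [node])).values = g.values ++ [[node]] := by
      unfold PySem.Dict.modify
      rw [PySem.Dict.values, PySem.Dict.items_insert_of_not_contains g _ hDc,
        PySem.Dict.getD_of_not_contains g [] hDc]
      simp [PySem.Dict.values]
    show (_, _, _) = _
    unfold foldG
    simp only [hSc, Bool.false_eq_true, if_false, hadd, henum, hgetD,
      PySem.List.pySetD_natCast, PySem.List.pyGetD_natCast, hkeys', hvals']
    rw [← hvlen, getD_append_last, set_append_last]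
    simp

theorem keys_modify_nodup (g : PySem.Dict Int (List Int)) (hnd : g.keys.Nodup) (p : Int × Int) :
    (foldG g p).keys.Nodup := by
  by_cases hmem : p.2 ∈ g.keys
  · unfold foldG PySem.Dict.modify
    rw [PySem.Dict.keys_insert_of_contains g _ ((PySem.Dict.contains_iff_mem_keys g p.2).mpr hmem)]
    exact hnd
  · unfold foldG PySem.Dict.modify
    rw [PySem.Dict.keys_insert_of_not_contains g _
      (by rw [← Bool.not_eq_true, PySem.Dict.contains_iff_mem_keys]; exact hmem)]
    simp [List.nodup_append, hnd]
    exact fun a ha hz => hmem (hz ▸ ha)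

theorem cp_main : ∀ (cd : List (Int × Int)) (g : PySem.Dict Int (List Int)),
    (g.keys).Nodup →
    cd.foldl cpStepA (g.keys, cpEnum 0 g.keys, g.values)
      = ((cd.foldl foldG g).keys, cpEnum 0 (cd.foldl foldG g).keys, (cd.foldl foldG g).values) := by
  intro cd
  induction cd with
  | nil => intro g h; rfl
  | cons p cd ih =>
      intro g hnd
      simp only [List.foldl_cons, cp_step g hnd p]
      exact ih _ (keys_modify_nodup g hnd p)

-- keys of a modify step, as a pure list operation
theorem keys_foldG_step (g : PySem.Dict Int (List Int)) (p : Int × Int) :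
    (foldG g p).keys = if g.keys.contains p.2 then g.keys else g.keys ++ [p.2] := by
  by_cases hmem : p.2 ∈ g.keys
  · rw [if_pos (by simp [List.contains_eq_mem, hmem])]
    unfold foldG PySem.Dict.modify
    exact PySem.Dict.keys_insert_of_contains g _ ((PySem.Dict.contains_iff_mem_keys g p.2).mpr hmem)
  · rw [if_neg (by simp [List.contains_eq_mem, hmem])]
    unfold foldG PySem.Dict.modify
    exact PySem.Dict.keys_insert_of_not_contains g _
      (by rw [← Bool.not_eq_true, PySem.Dict.contains_iff_mem_keys]; exact hmem)

-- B's dedup fold over the values computes exactly the grouping dict's key list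
theorem keys_foldG_eq_dedup : ∀ (cd : List (Int × Int)) (g : PySem.Dict Int (List Int)),
    (cd.foldl foldG g).keys
      = (cd.map (fun p => p.2)).foldl (fun acc v => if acc.contains v then acc else acc ++ [v]) g.keys := by
  intro cd
  induction cd with
  | nil => intro g; rfl
  | cons p cd ih =>
      intro g
      simp only [List.foldl_cons, List.map_cons, ih (foldG g p), keys_foldG_step]

-- grouping dict entry = prefix filter of the input
theorem getD_foldG : ∀ (cd : List (Int × Int)) (g : PySem.Dict Int (List Int)) (c : Int),
    (cd.foldl foldG g).getD c []
      = g.getD c [] ++ (cd.filter (fun p => p.2 == c)).map (fun p => p.1) := by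
  intro cd
  induction cd with
  | nil => intro g c; simp
  | cons p cd ih =>
      intro g c
      rw [List.foldl_cons, ih (foldG g p) c]
      by_cases hc : c = p.2
      · have : (foldG g p).getD c [] = g.getD c [] ++ [p.1] := by
          unfold foldG
          rw [PySem.Dict.getD_modify, if_pos hc, hc]
        rw [this, List.filter_cons, if_pos (by simp [hc])]
        simp
      · have : (foldG g p).getD c [] = g.getD c [] := by
          unfold foldG
          rw [PySem.Dict.getD_modify, if_neg hc]
        rw [this, List.filter_cons, if_neg (by simp; exact fun h => hc h.symm)]

-- with nodup keys, values is keys mapped through getD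
theorem values_mk_eq_map : ∀ (its : List (Int × List Int)), (its.map Prod.fst).Nodup →
    its.map Prod.snd = (its.map Prod.fst).map (fun c => (PySem.Dict.mk its).getD c []) := by
  intro its
  induction its with
  | nil => intro _; rfl
  | cons q its ih =>
      intro hnd
      obtain ⟨k, v⟩ := q
      simp only [List.map_cons, List.nodup_cons] at hnd ⊢
      congr 1
      · rw [PySem.Dict.getD_eq_get?_getD, PySem.Dict.get?_mk_cons]
        simp
      · rw [ih hnd.2]
        apply List.map_congr_left
        intro c hc
        rw [PySem.Dict.getD_eq_get?_getD, PySem.Dict.getD_eq_get?_getD, PySem.Dict.get?_mk_cons,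
          if_neg (by simp; exact fun h => hnd.1 (h ▸ hc))]

theorem values_eq_map_getD (g : PySem.Dict Int (List Int)) (hnd : g.keys.Nodup) :
    g.values = g.keys.map (fun c => g.getD c []) := values_mk_eq_map g.items hnd

theorem nodup_foldG : ∀ (cd : List (Int × Int)) (g : PySem.Dict Int (List Int)),
    g.keys.Nodup → (cd.foldl foldG g).keys.Nodup := by
  intro cd
  induction cd with
  | nil => exact fun g h => h
  | cons p cd ih => exact fun g h => ih (foldG g p) (keys_modify_nodup g h p)

-- ===== VERDICT (by name: the statement is the Claim_ definition above) =====
theorem community_preprocessing_spec : Claim_equal_community_preprocessing := by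
  intro cd _
  unfold Spec_community_preprocessing community_preprocessing community_preprocessing_alt
  have hnd0 : (PySem.Dict.empty : PySem.Dict Int (List Int)).keys.Nodup := by
    simp [PySem.Dict.keys, PySem.Dict.empty]
  set G := cd.foldl foldG PySem.Dict.empty with hG
  have hfold : cd.foldl cpStepA (PySem.Set.empty, PySem.Dict.empty, ([] : List (List Int)))
      = (G.keys, cpEnum 0 G.keys, G.values) := cp_main cd PySem.Dict.empty hnd0
  have horder : (cd.map (fun p => p.2)).foldl
      (fun acc v => if acc.contains v then acc else acc ++ [v]) [] = G.keys := by
    rw [hG, keys_foldG_eq_dedup]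
    rfl
  have hvals : G.values = G.keys.map (fun c => (cd.filter (fun p => p.2 == c)).map (fun p => p.1)) := by
    rw [values_eq_map_getD G (nodup_foldG cd PySem.Dict.empty hnd0)]
    apply List.map_congr_left
    intro c _
    rw [hG, getD_foldG]
    simp [PySem.Dict.getD, PySem.Dict.empty, PySem.Dict.get?]
  simp only [hfold, horder, hvals]
  rfl
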